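-- pv_equiv track=rewrite | github.com/teyter/SARS-CoV-2_sequencing | teitlib.py | aligndash
-- ===== SOURCE A (Python) =====
-- def string(li):
--     s = ""
--     for i in li:
--         s += i
--     return s
--
-- def aligndash(Text,Pattern):
--     s = "-"*len(Text)
--     s = list(s)
--     for i in range(len(Pattern)):
--         index = Text.find(Pattern[i])
--         if index >= 0:
--             s[index:index+len(Pattern[i])] = list(Pattern[i])
--     return string(s)
-- ===== SOURCE B (Python) =====
-- def aligndash(Text, Pattern):
--     # Query formulation: instead of mutating a dash buffer, compute each output
--     # position directly as the character of the LAST pattern whose first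
--     # occurrence covers it (= first covering match among the reversed patterns).
--     matches = [(Text.find(p), p) for p in reversed(Pattern)]
--     out = []
--     for j in range(len(Text)):
--         ch = "-"
--         for i, p in matches:
--             if 0 <= i <= j < i + len(p):
--                 ch = p[j - i]
--                 break
--         out.append(ch)
--     return "".join(out)
-- ===== Notes on version B (the rewrite author's own statement) =====
-- stated objective: alternative
-- what changed: B inverts the computation: instead of A's pattern-major loop that mutates a dash buffer by list-slice assignment (last write wins), B precomputes the first-occurrence of each pattern once and then builds the output position-by-position, each character being the first covering match among the reversed patterns (no mutation, no write/overwrite semantics).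
import Mathlib
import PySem

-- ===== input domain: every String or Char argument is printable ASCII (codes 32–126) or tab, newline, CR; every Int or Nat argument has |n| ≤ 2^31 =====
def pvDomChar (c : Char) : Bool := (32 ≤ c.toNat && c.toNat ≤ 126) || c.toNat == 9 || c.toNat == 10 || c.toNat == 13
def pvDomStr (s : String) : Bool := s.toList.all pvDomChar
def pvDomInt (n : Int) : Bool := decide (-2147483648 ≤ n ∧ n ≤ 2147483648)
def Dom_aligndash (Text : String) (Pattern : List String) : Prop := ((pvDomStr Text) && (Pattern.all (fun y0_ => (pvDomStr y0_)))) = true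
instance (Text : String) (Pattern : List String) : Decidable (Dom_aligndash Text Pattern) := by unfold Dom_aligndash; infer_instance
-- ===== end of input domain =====

-- B replaces A's pattern-major mutation of a dash buffer (list-slice writes, last write wins)
-- by a position-major query: output char j = first covering match among the reversed patterns.
-- Alternative structure, same answers.

-- ===== PORT A =====
-- helper `string(li)`: s = ""; for i in li: s += i — over the char list (exact for these chars)
def pvStringAcc (li : List Char) : List Char := li.foldl (fun s c => s ++ [c]) []

def aligndash (Text : String) (Pattern : List String) : String :=
  let T := Text.toList
  -- s = list("-"*len(Text))
  let s0 : List Char := List.replicate T.length '-'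
  -- for i in range(len(Pattern)): index = Text.find(Pattern[i]); if index >= 0: slice-assign
  let s := Pattern.foldl (fun s p =>
    let index := PySem.Chars.find T p.toList
    if 0 ≤ index then
      -- s[index:index+len(p)] = list(p); exact as take/++/drop: 0 ≤ index and
      -- index+len(p) ≤ len(s) because find returned an occurrence inside Text
      s.take index.toNat ++ p.toList ++ s.drop (index.toNat + p.toList.length)
    else s) s0
  String.mk (pvStringAcc s)

-- ===== PORT B =====
-- the inner loop of B: first match (i, p) with 0 <= i <= j < i+len(p) supplies p[j-i], else '-'
-- (p[j-i] never raises: the condition puts j-i in range, so pyGet? is some — exact)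
def pvScan (ms : List (Int × List Char)) (j : Int) : Char :=
  match ms with
  | [] => '-'
  | (i, p) :: rest =>
    if 0 ≤ i ∧ i ≤ j ∧ j < i + (p.length : Int) then (PySem.List.pyGet? p (j - i)).getD '-'
    else pvScan rest j

def aligndash_alt (Text : String) (Pattern : List String) : String :=
  let T := Text.toList
  -- ms = [(Text.find(p), p) for p in reversed(Pattern)]
  let ms := Pattern.reverse.map (fun p => (PySem.Chars.find T p.toList, p.toList))
  -- out = [first covering match char for j in range(len(Text))]; "".join(out)
  String.mk (PySem.Chars.join [] ((PySem.List.pyRange 0 T.length 1).map (fun j => [pvScan ms j])))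

-- ===== PRECONDITION & SPEC =====
def Spec_aligndash (Text : String) (Pattern : List String) (out : String) : Prop := out = aligndash_alt Text Pattern
instance (Text : String) (Pattern : List String) (out : String) : Decidable (Spec_aligndash Text Pattern out) := by unfold Spec_aligndash; infer_instance

-- ===== CLAIM (what is proved, stated in full; the proofs are below) =====
def Claim_equal_aligndash : Prop := ∀ (Text : String) (Pattern : List String), Dom_aligndash Text Pattern → Spec_aligndash Text Pattern (aligndash Text Pattern)

-- ===== LEMMAS AND PROOFS =====

theorem pvStringAcc_general (li acc : List Char) :
    li.foldl (fun s c => s ++ [c]) acc = acc ++ li := by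
  induction li generalizing acc with
  | nil => simp
  | cons c cs ih => simp [List.foldl, ih]

theorem pvStringAcc_eq (li : List Char) : pvStringAcc li = li := by
  unfold pvStringAcc; rw [pvStringAcc_general]; rfl

-- pvScan with an arbitrary default, for the append lemma
def pvScanD (ms : List (Int × List Char)) (j : Int) (d : Char) : Char :=
  match ms with
  | [] => d
  | (i, p) :: rest =>
    if 0 ≤ i ∧ i ≤ j ∧ j < i + (p.length : Int) then (PySem.List.pyGet? p (j - i)).getD '-'
    else pvScanD rest j d

theorem pvScan_eq_scanD (ms : List (Int × List Char)) (j : Int) :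
    pvScan ms j = pvScanD ms j '-' := by
  induction ms with
  | nil => rfl
  | cons m rest ih => cases m with | mk i p => simp [pvScan, pvScanD, ih]

theorem pvScanD_append (a b : List (Int × List Char)) (j : Int) (d : Char) :
    pvScanD (a ++ b) j d = pvScanD a j (pvScanD b j d) := by
  induction a with
  | nil => rfl
  | cons m rest ih => cases m with | mk i p => simp [pvScanD, ih]

-- one slice assignment of A, pointwise
theorem getD_splice (s cs : List Char) (i j : Nat) (hle : i + cs.length ≤ s.length) :
    (s.take i ++ cs ++ s.drop (i + cs.length)).getD j '-' =
      if i ≤ j ∧ j < i + cs.length then cs.getD (j - i) '-' else s.getD j '-' := by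
  have hti : (s.take i).length = i := by simp; omega
  simp only [List.getD_eq_getElem?_getD]
  by_cases h1 : j < i
  · rw [if_neg (by omega)]
    rw [List.getElem?_append_left (by rw [List.length_append, hti]; omega)]
    rw [List.getElem?_append_left (by rw [hti]; exact h1)]
    rw [List.getElem?_take_of_lt h1]
  · by_cases h2 : j < i + cs.length
    · rw [if_pos ⟨by omega, h2⟩]
      rw [List.getElem?_append_left (by rw [List.length_append, hti]; omega)]
      rw [List.getElem?_append_right (by rw [hti]; omega)]
      rw [hti]
    · rw [if_neg (by omega)]
      rw [List.getElem?_append_right (by rw [List.length_append, hti]; omega)]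
      rw [List.length_append, hti, List.getElem?_drop]
      have h3 : i + cs.length + (j - (i + cs.length)) = j := by omega
      rw [h3]

theorem pvFindBound (T p : List Char) (hf : 0 ≤ PySem.Chars.find T p) :
    (PySem.Chars.find T p).toNat + p.length ≤ T.length := by
  have hspec := PySem.Chars.find_spec (s := T) (sub := p) hf
  have h1 := hspec.1.length_le
  rw [List.length_drop] at h1
  have h2 := PySem.Chars.find_le_length (s := T) (sub := p)
  omega

-- A's step, pointwise, equals B's single-match scan with default = old char
theorem pvStepPoint (T : List Char) (p : List Char) (s : List Char)
    (hlen : s.length = T.length) (j : Nat) :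
    (if 0 ≤ PySem.Chars.find T p then
        s.take (PySem.Chars.find T p).toNat ++ p ++ s.drop ((PySem.Chars.find T p).toNat + p.length)
      else s).getD j '-'
      = pvScanD [(PySem.Chars.find T p, p)] j (s.getD j '-') := by
  by_cases hf : 0 ≤ PySem.Chars.find T p
  · rw [if_pos hf]
    set iZ := PySem.Chars.find T p with hiZ
    have hple := pvFindBound T p hf
    rw [← hiZ] at hple
    rw [getD_splice s p iZ.toNat j (by omega)]
    have hiz : ((iZ.toNat : Int)) = iZ := Int.toNat_of_nonneg hf
    simp only [pvScanD]
    by_cases hc : iZ.toNat ≤ j ∧ j < iZ.toNat + p.length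
    · rw [if_pos hc]
      rw [if_pos (show 0 ≤ iZ ∧ iZ ≤ (j : Int) ∧ (j : Int) < iZ + (p.length : Int) by
        refine ⟨hf, ?_, ?_⟩ <;> omega)]
      have hk : ((j : Int) - iZ) = ((j - iZ.toNat : Nat) : Int) := by omega
      rw [hk, PySem.List.pyGet?_natCast]
      rw [List.getD_eq_getElem?_getD]
    · rw [if_neg hc]
      rw [if_neg (show ¬ (0 ≤ iZ ∧ iZ ≤ (j : Int) ∧ (j : Int) < iZ + (p.length : Int)) by
        intro ⟨_, h2, h3⟩; omega)]
  · rw [if_neg hf]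
    simp only [pvScanD]
    rw [if_neg (by intro ⟨h1, _, _⟩; exact hf h1)]

theorem pvStepLen (T : List Char) (p : List Char) (s : List Char) (hlen : s.length = T.length) :
    (if 0 ≤ PySem.Chars.find T p then
        s.take (PySem.Chars.find T p).toNat ++ p ++ s.drop ((PySem.Chars.find T p).toNat + p.length)
      else s).length = T.length := by
  by_cases hf : 0 ≤ PySem.Chars.find T p
  · rw [if_pos hf]
    have hple := pvFindBound T p hf
    simp only [List.length_append, List.length_take, List.length_drop, hlen]
    omega
  · rw [if_neg hf]; exact hlen

-- the whole loop of A, pointwise, equals B's scan over the reversed match list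
theorem pvLoopPoint (T : List Char) (Ps : List String) (s : List Char)
    (hlen : s.length = T.length) (j : Nat) (hj : j < T.length) :
    (Ps.foldl (fun s p =>
        let index := PySem.Chars.find T p.toList
        if 0 ≤ index then s.take index.toNat ++ p.toList ++ s.drop (index.toNat + p.toList.length)
        else s) s).getD j '-'
      = pvScanD (Ps.reverse.map (fun p => (PySem.Chars.find T p.toList, p.toList))) j (s.getD j '-') := by
  induction Ps generalizing s with
  | nil => rfl
  | cons p ps ih =>
    simp only [List.foldl_cons, List.reverse_cons, List.map_append, List.map_cons, List.map_nil]
    rw [pvScanD_append]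
    rw [ih _ (pvStepLen T p.toList s hlen)]
    rw [pvStepPoint T p.toList s hlen j]

theorem pvLoopLen (T : List Char) (Ps : List String) (s : List Char) (hlen : s.length = T.length) :
    (Ps.foldl (fun s p =>
        let index := PySem.Chars.find T p.toList
        if 0 ≤ index then s.take index.toNat ++ p.toList ++ s.drop (index.toNat + p.toList.length)
        else s) s).length = T.length := by
  induction Ps generalizing s with
  | nil => exact hlen
  | cons p ps ih => exact ih _ (pvStepLen T p.toList s hlen)

-- pointwise agreement gives equality with the rendered join
theorem pvRender (n : Nat) (sF : List Char) (g : Int → Char)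
    (hlen : sF.length = n) (hpt : ∀ j : Nat, j < n → sF.getD j '-' = g (j : Int)) :
    sF = PySem.Chars.join [] ((PySem.List.pyRange 0 n 1).map (fun j => [g j])) := by
  rw [show (fun j : Int => [g j]) = ((fun c : Char => [c]) ∘ g) from rfl]
  rw [← List.map_map, PySem.Chars.join_nil_singletons]
  rw [PySem.List.pyRange_zero_nat, List.map_map]
  apply List.ext_getElem
  · simp [hlen]
  · intro k h1 h2
    simp only [List.getElem_map, List.getElem_range, Function.comp_apply]
    have hk : k < n := hlen ▸ h1
    rw [← hpt k hk, List.getD_eq_getElem]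

-- ===== VERDICT (by name: the statement is the Claim_ definition above) =====
theorem aligndash_spec : Claim_equal_aligndash := by
  intro Text Pattern _
  show aligndash Text Pattern = aligndash_alt Text Pattern
  unfold aligndash aligndash_alt
  refine congrArg String.mk ?_
  rw [pvStringAcc_eq]
  apply pvRender Text.toList.length _ (fun j => pvScan (Pattern.reverse.map (fun p => (PySem.Chars.find Text.toList p.toList, p.toList))) j)
  · exact pvLoopLen Text.toList Pattern _ (by simp)
  · intro j hj
    rw [pvScan_eq_scanD]
    rw [pvLoopPoint Text.toList Pattern _ (by simp) j hj]
    congr 1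
    simp [List.getD_eq_getElem?_getD]
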